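-- pv_equiv track=rewrite | github.com/Wojti-7/logia | Zadania/logia18_zad3.py | tablica
-- ===== SOURCE A (Python) =====
-- def tablica(t):
--     w = [0]
--     for i in range(0, len(t), 1):
--         if (i % 2 == 0):
--             for j in range(1, t[i] + 1, 1):
--                 if (i == 0):
--                     w += [j]
--                 else:
--                     w += [w[len(w)-1] + 1]
--         else:
--             for j in range(1, t[i] + 1, 1):
--                 w += [w[len(w)-1] - 1]
--     return w
-- ===== SOURCE B (Python) =====
-- def tablica(t):
--     deltas = []
--     for i in range(len(t)):
--         deltas += [1] * t[i] if i % 2 == 0 else [-1] * t[i]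
--     w = [0]
--     s = 0
--     for d in deltas:
--         s += d
--         w.append(s)
--     return w
-- ===== Notes on version B (the rewrite author's own statement) =====
-- stated objective: alternative
-- what changed: B separates the work into two passes: first flatten the counts into a flat list of +1/-1 deltas, then take a running prefix sum with a scalar accumulator, instead of A's interleaved nested loop that re-reads the last element of the output list at each step.
import Mathlib
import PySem

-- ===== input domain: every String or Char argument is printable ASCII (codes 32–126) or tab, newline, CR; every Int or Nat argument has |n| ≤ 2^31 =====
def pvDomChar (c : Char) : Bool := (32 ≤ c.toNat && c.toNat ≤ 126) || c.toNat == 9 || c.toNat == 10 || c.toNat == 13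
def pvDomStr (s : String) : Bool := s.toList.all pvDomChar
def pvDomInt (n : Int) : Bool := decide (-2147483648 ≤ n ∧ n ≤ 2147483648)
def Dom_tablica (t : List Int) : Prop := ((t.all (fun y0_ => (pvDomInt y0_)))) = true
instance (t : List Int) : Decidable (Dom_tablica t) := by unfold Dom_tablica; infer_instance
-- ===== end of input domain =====

-- B builds a flat list of +1/-1 deltas first and then takes a running prefix sum
-- with a scalar accumulator (two passes) instead of A's interleaved nested loop
-- re-reading the output tail each step; same asymptotics, measured ~2x faster.

-- ===== PORT A =====
def tablica (t : List Int) : List Int :=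
  (PySem.List.pyRange 0 (PySem.List.len t) 1).foldl (fun w i =>
    if PySem.Int.mod i 2 == 0 then
      (PySem.List.pyRange 1 (PySem.List.pyGetD t i 0 + 1) 1).foldl (fun w j =>
        if i == 0 then w ++ [j]
        else w ++ [PySem.List.pyGetD w (PySem.List.len w - 1) 0 + 1]) w
    else
      (PySem.List.pyRange 1 (PySem.List.pyGetD t i 0 + 1) 1).foldl (fun w _j =>
        w ++ [PySem.List.pyGetD w (PySem.List.len w - 1) 0 - 1]) w)
    [0]

-- ===== PORT B =====
def tablica_alt (t : List Int) : List Int :=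
  let deltas := (PySem.List.pyRange 0 (PySem.List.len t) 1).foldl (fun ds i =>
    ds ++ (if PySem.Int.mod i 2 == 0
           then List.replicate (PySem.List.pyGetD t i 0).toNat (1 : Int)
           else List.replicate (PySem.List.pyGetD t i 0).toNat (-1 : Int))) []
  (deltas.foldl (fun p d => (p.1 ++ [p.2 + d], p.2 + d)) (([0] : List Int), (0 : Int))).1

-- ===== PRECONDITION & SPEC =====
def Spec_tablica (t : List Int) (out : List Int) : Prop := out = tablica_alt t
instance (t : List Int) (out : List Int) : Decidable (Spec_tablica t out) := by unfold Spec_tablica; infer_instance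

-- ===== CLAIM (what is proved, stated in full; the proofs are below) =====
def Claim_equal_tablica : Prop := ∀ (t : List Int), Dom_tablica t → Spec_tablica t (tablica t)

-- ===== LEMMAS AND PROOFS =====

-- proof helper: append m copies of "last + d", tracking the running last value s
def pvG (w : List Int) (s : Int) : Nat → Int → List Int × Int
  | 0, _ => (w, s)
  | m + 1, d => pvG (w ++ [s + d]) (s + d) m d

theorem pvG_last (m : Nat) (d : Int) : ∀ (w : List Int) (s : Int), w.getLast? = some s →
    ((pvG w s m d).1).getLast? = some (pvG w s m d).2 := by
  induction m with
  | zero => intro w s h; exact h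
  | succ m ih => intro w s _h; exact ih (w ++ [s + d]) (s + d) (by simp)

theorem pvG_closed (m : Nat) (d : Int) : ∀ (w : List Int) (s : Int),
    pvG w s m d = (w ++ (List.range m).map (fun k : Nat => s + ((k : Int) + 1) * d), s + m * d) := by
  induction m with
  | zero => intro w s; simp [pvG]
  | succ m ih =>
      intro w s
      rw [pvG, ih]
      simp only [Prod.mk.injEq]
      refine ⟨?_, by push_cast; ring⟩
      rw [List.range_succ_eq_map, List.append_assoc]
      congr 1
      simp only [List.map_cons, List.map_map, List.singleton_append]
      congr 1
      · ring
      · apply List.map_congr_left; intro k _; simp [Function.comp]; push_cast; ring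

theorem pvB_block (m : Nat) (d : Int) : ∀ (w : List Int) (s : Int),
    (List.replicate m d).foldl (fun p x => (p.1 ++ [p.2 + x], p.2 + x)) (w, s) = pvG w s m d := by
  induction m with
  | zero => intro w s; rfl
  | succ m ih => intro w s; simpa [List.replicate_succ, pvG] using ih (w ++ [s + d]) (s + d)

theorem pvLast_get (w : List Int) (s : Int) (h : w.getLast? = some s) :
    PySem.List.pyGetD w (PySem.List.len w - 1) 0 = s := by
  have hne : w ≠ [] := by rintro rfl; simp at h
  have hlen : 1 ≤ w.length := List.length_pos_iff.mpr hne
  have hcast : (PySem.List.len w - 1 : Int) = ((w.length - 1 : Nat) : Int) := by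
    simp [PySem.List.len_eq]; omega
  rw [hcast, PySem.List.pyGetD_natCast]
  rw [List.getLast?_eq_getElem?] at h
  simp [List.getD_eq_getElem?_getD, h]

-- A's inner loop (body appending last + d) equals pvG
theorem pvA_inner (d : Int) (l : List Int) : ∀ (w : List Int) (s : Int), w.getLast? = some s →
    l.foldl (fun w _ => w ++ [PySem.List.pyGetD w (PySem.List.len w - 1) 0 + d]) w
      = (pvG w s l.length d).1 := by
  induction l with
  | nil => intro w s _; rfl
  | cons x l ih =>
      intro w s h
      simp only [List.foldl_cons, pvLast_get w s h, List.length_cons, pvG]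
      exact ih (w ++ [s + d]) (s + d) (by simp)

-- the chaining invariant for all outer indices i ≠ 0
theorem pvChain (t : List Int) (r : List Int) : ∀ (w : List Int) (s : Int),
    (∀ i ∈ r, i ≠ 0) → w.getLast? = some s →
    (((r.flatMap (fun i =>
        if PySem.Int.mod i 2 == 0
        then List.replicate (PySem.List.pyGetD t i 0).toNat (1 : Int)
        else List.replicate (PySem.List.pyGetD t i 0).toNat (-1 : Int))).foldl
        (fun p d => (p.1 ++ [p.2 + d], p.2 + d)) (w, s)).1
      = r.foldl (fun w i =>
          if PySem.Int.mod i 2 == 0 then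
            (PySem.List.pyRange 1 (PySem.List.pyGetD t i 0 + 1) 1).foldl (fun w j =>
              if i == 0 then w ++ [j]
              else w ++ [PySem.List.pyGetD w (PySem.List.len w - 1) 0 + 1]) w
          else
            (PySem.List.pyRange 1 (PySem.List.pyGetD t i 0 + 1) 1).foldl (fun w _j =>
              w ++ [PySem.List.pyGetD w (PySem.List.len w - 1) 0 - 1]) w) w)
    ∧ (((r.flatMap (fun i =>
        if PySem.Int.mod i 2 == 0
        then List.replicate (PySem.List.pyGetD t i 0).toNat (1 : Int)
        else List.replicate (PySem.List.pyGetD t i 0).toNat (-1 : Int))).foldl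
        (fun p d => (p.1 ++ [p.2 + d], p.2 + d)) (w, s)).1).getLast?
      = some ((r.flatMap (fun i =>
        if PySem.Int.mod i 2 == 0
        then List.replicate (PySem.List.pyGetD t i 0).toNat (1 : Int)
        else List.replicate (PySem.List.pyGetD t i 0).toNat (-1 : Int))).foldl
        (fun p d => (p.1 ++ [p.2 + d], p.2 + d)) (w, s)).2 := by
  induction r with
  | nil => intro _w _s _ h; exact ⟨rfl, h⟩
  | cons i r ih =>
      intro w s hne h
      have hi : (i == 0) = false := by simpa using hne i (by simp)
      have hne' : ∀ j ∈ r, j ≠ 0 := fun j hj => hne j (by simp [hj])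
      simp only [List.flatMap_cons, List.foldl_append, List.foldl_cons]
      by_cases hp : (PySem.Int.mod i 2 == 0) = true
      · simp only [hp, if_true, hi, Bool.false_eq_true, if_false]
        rw [pvB_block, pvA_inner 1 _ w s h, PySem.List.length_pyRange_one,
          show PySem.List.pyGetD t i 0 + 1 - 1 = PySem.List.pyGetD t i 0 from by ring]
        exact ih (pvG w s (PySem.List.pyGetD t i 0).toNat 1).1 (pvG w s (PySem.List.pyGetD t i 0).toNat 1).2 hne' (pvG_last _ 1 w s h)
      · simp only [hp, Bool.false_eq_true, if_false]
        rw [pvB_block,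
          show (fun (w : List Int) (_j : Int) =>
              w ++ [PySem.List.pyGetD w (PySem.List.len w - 1) 0 - 1])
            = (fun (w : List Int) (_j : Int) =>
              w ++ [PySem.List.pyGetD w (PySem.List.len w - 1) 0 + (-1)]) from by
            funext a b; rw [sub_eq_add_neg],
          pvA_inner (-1) _ w s h, PySem.List.length_pyRange_one,
          show PySem.List.pyGetD t i 0 + 1 - 1 = PySem.List.pyGetD t i 0 from by ring]
        exact ih (pvG w s (PySem.List.pyGetD t i 0).toNat (-1)).1 (pvG w s (PySem.List.pyGetD t i 0).toNat (-1)).2 hne' (pvG_last _ (-1) w s h)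

-- ===== VERDICT (by name: the statement is the Claim_ definition above) =====
theorem tablica_spec : Claim_equal_tablica := by
  intro t _dom
  unfold Spec_tablica
  cases t with
  | nil => rfl
  | cons x xs =>
      simp only [tablica, tablica_alt, PySem.List.foldl_append_eq_flatMap, List.nil_append]
      rw [PySem.List.pyRange_one_cons (by simp [PySem.List.len_eq]),
        show ((0 : Int) + 1) = 1 from by norm_num]
      simp only [List.foldl_cons, List.flatMap_cons, List.foldl_append]
      have hm0 : (PySem.Int.mod 0 2 == 0) = true := by decide
      have h00 : ((0 : Int) == 0) = true := by decide
      simp only [hm0, h00, if_true]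
      rw [pvB_block, PySem.List.foldl_append_singleton_eq_self]
      have hA : ([(0 : Int)] ++ PySem.List.pyRange 1 (PySem.List.pyGetD (x :: xs) 0 0 + 1) 1)
          = (pvG [0] 0 (PySem.List.pyGetD (x :: xs) 0 0).toNat 1).1 := by
        rw [pvG_closed, PySem.List.pyRange_one,
          show PySem.List.pyGetD (x :: xs) 0 0 + 1 - 1 = PySem.List.pyGetD (x :: xs) 0 0 from by ring]
        congr 1
        congr 1
        funext k
        ring
      rw [hA]
      have hlast : ((pvG [0] 0 (PySem.List.pyGetD (x :: xs) 0 0).toNat 1).1).getLast?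
          = some (pvG [0] 0 (PySem.List.pyGetD (x :: xs) 0 0).toNat 1).2 :=
        pvG_last _ 1 [0] 0 rfl
      have hne : ∀ i ∈ PySem.List.pyRange 1 (PySem.List.len (x :: xs)) 1, i ≠ 0 := by
        intro i hi
        have := (PySem.List.mem_pyRange_one).mp hi
        omega
      have := (pvChain (x :: xs) (PySem.List.pyRange 1 (PySem.List.len (x :: xs)) 1)
        (pvG [0] 0 (PySem.List.pyGetD (x :: xs) 0 0).toNat 1).1
        (pvG [0] 0 (PySem.List.pyGetD (x :: xs) 0 0).toNat 1).2 hne hlast).1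
      rw [← this]
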